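-- pv_equiv track=rewrite | github.com/pypi-data/pypi-mirror-12 | packages/scipio/scipio-0.3.0.tar.gz/scipio-0.3.0/scipio/build.py | parse_xcodebuild_list
-- ===== SOURCE A (Python) =====
-- def parse_xcodebuild_list(output_string):
--     """Decompose xcode -list output to lists"""
--     lines = output_string.splitlines()
--     gathering = ''
--     target_list = []
--     configurations_list = []
--     schemes_list = []
--     for line in lines:
--         if line == '    Targets:':
--             gathering = 'targets'
--         elif line == '    Build Configurations:':
--             gathering = 'configurations'
--         elif line == '    Schemes:':
--             gathering = 'schemes'
--         elif not line:
--             gathering = ''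
--         elif gathering:
--             if gathering == 'targets':
--                 target_list.append(line.strip())
--             elif gathering == 'configurations':
--                 configurations_list.append(line.strip())
--             elif gathering == 'schemes':
--                 schemes_list.append(line.strip())
--     return target_list, configurations_list, schemes_list
-- ===== SOURCE B (Python) =====
-- def parse_xcodebuild_list(output_string):
--     """Decompose xcode -list output to lists"""
--     headers = ('    Targets:', '    Build Configurations:', '    Schemes:')
--     lines = output_string.splitlines()
--
--     def section(header):
--         out = []
--         for i, line in enumerate(lines):
--             if line == header:
--                 for nxt in lines[i + 1:]:
--                     if not nxt or nxt in headers: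
--                         break
--                     out.append(nxt.strip())
--         return out
--
--     return section(headers[0]), section(headers[1]), section(headers[2])
-- ===== Notes on version B (the rewrite author's own statement) =====
-- stated objective: alternative
-- what changed: Replaces A's single stateful scan with a mode variable and a nested dispatch by three independent per-header extractions: for each header, collect the stripped lines following each of its occurrences up to the first blank or header line.
import Mathlib
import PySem

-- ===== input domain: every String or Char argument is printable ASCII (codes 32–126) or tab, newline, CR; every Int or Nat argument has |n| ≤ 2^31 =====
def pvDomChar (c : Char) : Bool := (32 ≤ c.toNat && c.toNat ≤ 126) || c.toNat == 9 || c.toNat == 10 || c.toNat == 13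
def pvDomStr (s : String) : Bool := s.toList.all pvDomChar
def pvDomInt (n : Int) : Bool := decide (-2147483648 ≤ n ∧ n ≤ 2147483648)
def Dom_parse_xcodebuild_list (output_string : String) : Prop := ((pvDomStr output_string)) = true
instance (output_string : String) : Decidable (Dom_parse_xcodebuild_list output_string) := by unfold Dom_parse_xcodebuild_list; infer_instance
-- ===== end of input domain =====

-- B replaces A's single stateful scan (a mode variable) by three independent
-- section extractions: for each header, collect the stripped lines after each of its
-- occurrences up to the first blank or header line (objective: alternative decomposition).

-- ===== PORT A =====
-- one iteration of A's for-loop over (gathering, target_list, configurations_list, schemes_list)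
def pvStepA (st : String × List String × List String × List String) (line : String) :
    String × List String × List String × List String :=
  let (g, t, c, s) := st
  if line = "    Targets:" then ("targets", t, c, s)
  else if line = "    Build Configurations:" then ("configurations", t, c, s)
  else if line = "    Schemes:" then ("schemes", t, c, s)
  else if line = "" then ("", t, c, s)
  else if g ≠ "" then
    if g = "targets" then (g, t ++ [PySem.Str.strip line], c, s)
    else if g = "configurations" then (g, t, c ++ [PySem.Str.strip line], s)
    else if g = "schemes" then (g, t, c, s ++ [PySem.Str.strip line])
    else (g, t, c, s)
  else (g, t, c, s)

def parse_xcodebuild_list (output_string : String) : List String × List String × List String :=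
  ((PySem.Str.splitlines output_string).foldl pvStepA ("", [], [], [])).2

-- ===== PORT B =====
def pvHeaders : List String := ["    Targets:", "    Build Configurations:", "    Schemes:"]

-- B's inner loop: lines after a header occurrence, up to the first blank or header line
def pvCollect : List String → List String
  | [] => []
  | l :: ls => if l = "" || pvHeaders.contains l then [] else PySem.Str.strip l :: pvCollect ls

-- B's 'section(header)': one pass over the lines, collecting after each occurrence of the header
def pvSection (h : String) : List String → List String
  | [] => []
  | l :: ls => (if l = h then pvCollect ls else []) ++ pvSection h ls

def parse_xcodebuild_list_alt (output_string : String) : List String × List String × List String :=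
  let lines := PySem.Str.splitlines output_string
  (pvSection "    Targets:" lines,
   pvSection "    Build Configurations:" lines,
   pvSection "    Schemes:" lines)

-- ===== PRECONDITION & SPEC =====
def Spec_parse_xcodebuild_list (output_string : String) (out : List String × List String × List String) : Prop := out = parse_xcodebuild_list_alt output_string
instance (output_string : String) (out : List String × List String × List String) : Decidable (Spec_parse_xcodebuild_list output_string out) := by unfold Spec_parse_xcodebuild_list; infer_instance

-- ===== CLAIM (what is proved, stated in full; the proofs are below) =====
def Claim_equal_parse_xcodebuild_list : Prop := ∀ (output_string : String), Dom_parse_xcodebuild_list output_string → Spec_parse_xcodebuild_list output_string (parse_xcodebuild_list output_string)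

-- ===== LEMMAS AND PROOFS =====
theorem pvLoop (ls : List String) (g : String) (t c s : List String)
    (hg : g = "" ∨ g = "targets" ∨ g = "configurations" ∨ g = "schemes") :
    (ls.foldl pvStepA (g, t, c, s)).2 =
      (t ++ (if g = "targets" then pvCollect ls else []) ++ pvSection "    Targets:" ls,
       c ++ (if g = "configurations" then pvCollect ls else []) ++ pvSection "    Build Configurations:" ls,
       s ++ (if g = "schemes" then pvCollect ls else []) ++ pvSection "    Schemes:" ls) := by
  induction ls generalizing g t c s with
  | nil => simp [pvSection, pvCollect]
  | cons l ls ih =>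
    rw [List.foldl_cons]
    by_cases h1 : l = "    Targets:"
    · subst h1
      rw [show pvStepA (g, t, c, s) "    Targets:" = ("targets", t, c, s) by simp [pvStepA]]
      rw [ih "targets" t c s (by simp)]
      simp [pvSection, pvCollect, pvHeaders]
    · by_cases h2 : l = "    Build Configurations:"
      · subst h2
        rw [show pvStepA (g, t, c, s) "    Build Configurations:" = ("configurations", t, c, s) by
          simp [pvStepA]]
        rw [ih "configurations" t c s (by simp)]
        simp [pvSection, pvCollect, pvHeaders]
      · by_cases h3 : l = "    Schemes:"
        · subst h3
          rw [show pvStepA (g, t, c, s) "    Schemes:" = ("schemes", t, c, s) by simp [pvStepA]]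
          rw [ih "schemes" t c s (by simp)]
          simp [pvSection, pvCollect, pvHeaders]
        · by_cases h0 : l = ""
          · subst h0
            rw [show pvStepA (g, t, c, s) "" = ("", t, c, s) by simp [pvStepA]]
            rw [ih "" t c s (by simp)]
            simp [pvSection, pvCollect, pvHeaders]
          · -- ordinary line: appended to the active list (if any)
            rcases hg with hg | hg | hg | hg <;> subst hg
            · rw [show pvStepA ("", t, c, s) l = ("", t, c, s) by
                simp [pvStepA, h1, h2, h3, h0]]
              rw [ih "" t c s (by simp)]
              simp [pvSection, pvCollect, pvHeaders, h1, h2, h3, h0]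
            · rw [show pvStepA ("targets", t, c, s) l = ("targets", t ++ [PySem.Str.strip l], c, s) by
                simp [pvStepA, h1, h2, h3, h0]]
              rw [ih "targets" (t ++ [PySem.Str.strip l]) c s (by simp)]
              simp [pvSection, pvCollect, pvHeaders, h1, h2, h3, h0]
            · rw [show pvStepA ("configurations", t, c, s) l = ("configurations", t, c ++ [PySem.Str.strip l], s) by
                simp [pvStepA, h1, h2, h3, h0]]
              rw [ih "configurations" t (c ++ [PySem.Str.strip l]) s (by simp)]
              simp [pvSection, pvCollect, pvHeaders, h1, h2, h3, h0]
            · rw [show pvStepA ("schemes", t, c, s) l = ("schemes", t, c, s ++ [PySem.Str.strip l]) by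
                simp [pvStepA, h1, h2, h3, h0]]
              rw [ih "schemes" t c (s ++ [PySem.Str.strip l]) (by simp)]
              simp [pvSection, pvCollect, pvHeaders, h1, h2, h3, h0]

-- ===== VERDICT (by name: the statement is the Claim_ definition above) =====
theorem parse_xcodebuild_list_spec : Claim_equal_parse_xcodebuild_list := by
  intro output_string _
  unfold Spec_parse_xcodebuild_list parse_xcodebuild_list parse_xcodebuild_list_alt
  rw [pvLoop _ "" [] [] [] (by simp)]
  simp
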